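-- pv_equiv track=rewrite | github.com/Anupam1707/datasense | visuals.py | dt
-- ===== SOURCE A (Python) =====
-- def dt(keys, values):
--     dt = {}
--     for key in keys:
--         dt[key] = 0
--         for value in values:
--             dt[key] += value
--             values.remove(value)
--             break
--     return dt
-- ===== SOURCE B (Python) =====
-- def dt(keys, values):
--     it = iter(values)
--     d = {}
--     for key in keys:
--         d[key] = next(it, 0)
--     return d
-- ===== Notes on version B (the rewrite author's own statement) =====
-- stated objective: faster
-- what changed: B replaces A's nested loop with its per-key reset-to-zero, in-place values.remove and break by a single pass that assigns each key the next value from an iterator (0 when exhausted); B does not mutate the values list (return-value equivalence only).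
import Mathlib
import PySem

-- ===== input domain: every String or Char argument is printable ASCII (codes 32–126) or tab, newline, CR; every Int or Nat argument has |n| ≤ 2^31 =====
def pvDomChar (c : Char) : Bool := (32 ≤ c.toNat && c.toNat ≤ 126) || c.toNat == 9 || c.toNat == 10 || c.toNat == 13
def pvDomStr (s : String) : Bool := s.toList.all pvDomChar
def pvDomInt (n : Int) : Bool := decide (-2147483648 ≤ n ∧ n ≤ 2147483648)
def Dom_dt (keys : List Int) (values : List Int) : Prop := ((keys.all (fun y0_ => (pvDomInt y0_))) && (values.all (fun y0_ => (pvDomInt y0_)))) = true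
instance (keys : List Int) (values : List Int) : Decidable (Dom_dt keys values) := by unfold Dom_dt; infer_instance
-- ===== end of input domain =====

-- B pairs each key with the next value via one pass (0 when values run out) instead of A's
-- nested loop with in-place values.remove; equivalence is about the RETURN value only
-- (A empties (part of) the caller's values list in place, B does not mutate it).

-- ===== PORT A =====
-- one iteration of A's outer loop: dt[key] = 0; then 'for value in values: dt[key] += value; values.remove(value); break'
def dtStep (st : PySem.Dict Int Int × List Int) (key : Int) : PySem.Dict Int Int × List Int :=
  let d := st.1.insert key 0
  match st.2 with
  | [] => (d, st.2)                  -- inner loop body never runs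
  | v :: _ =>
    let d := d.insert key (d.getD key 0 + v)
    (d, (PySem.List.remove? st.2 v).getD [])  -- values.remove(v): v is the head, so remove? is always some

def dt (keys : List Int) (values : List Int) : List (Int × Int) :=
  (keys.foldl dtStep (PySem.Dict.empty, values)).1.items

-- ===== PORT B =====
-- d[key] = next(it, 0), walking keys and the remaining values together
def dtAltGo (keys : List Int) (d : PySem.Dict Int Int) (vs : List Int) : PySem.Dict Int Int :=
  match keys, vs with
  | [], _ => d
  | k :: ks, [] => dtAltGo ks (d.insert k 0) []
  | k :: ks, v :: rest => dtAltGo ks (d.insert k v) rest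

def dt_alt (keys : List Int) (values : List Int) : List (Int × Int) :=
  (dtAltGo keys PySem.Dict.empty values).items

-- ===== PRECONDITION & SPEC =====
def Spec_dt (keys : List Int) (values : List Int) (out : List (Int × Int)) : Prop := out = dt_alt keys values
instance (keys : List Int) (values : List Int) (out : List (Int × Int)) : Decidable (Spec_dt keys values out) := by unfold Spec_dt; infer_instance

-- ===== CLAIM (what is proved, stated in full; the proofs are below) =====
def Claim_equal_dt : Prop := ∀ (keys : List Int) (values : List Int), Dom_dt keys values → Spec_dt keys values (dt keys values)

-- ===== LEMMAS AND PROOFS =====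
theorem dtLoop_eq (keys : List Int) (d : PySem.Dict Int Int) (vs : List Int) :
    (keys.foldl dtStep (d, vs)).1 = dtAltGo keys d vs := by
  induction keys generalizing d vs with
  | nil => rfl
  | cons k ks ih =>
    cases vs with
    | nil => simpa [List.foldl, dtStep, dtAltGo] using ih (d.insert k 0) []
    | cons v rest =>
      have h : dtStep (d, v :: rest) k = (d.insert k v, rest) := by
        simp [dtStep, PySem.Dict.getD_insert_self, PySem.Dict.insert_insert_self]
      simp only [List.foldl, h, dtAltGo]
      exact ih (d.insert k v) rest

-- ===== VERDICT (by name: the statement is the Claim_ definition above) =====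
theorem dt_spec : Claim_equal_dt := by
  intro keys values _
  show dt keys values = dt_alt keys values
  unfold dt dt_alt
  rw [dtLoop_eq]
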